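-- pv_equiv track=rewrite | github.com/jackievaleri/BioAutoMATED | main_classes/BioSeqAutoML_generic_automl_classes.py | small_glymotif_find
-- ===== SOURCE A (Python) =====
-- def small_glymotif_find(s):
--     """breaks down glycans into list of monomers. assumes that user provides glycans in a consistent universal notation
--     Parameters
--     ----------
--     s : str representing one glycan sequence
--
--     Returns
--     -------
--     b : str representing one glycan sequence separated by *
--     """
--
--     b = s.split('(')
--     b = [k.split(')') for k in b]
--     b = [item for sublist in b for item in sublist]
--     b = [k.strip('[') for k in b]
--     b = [k.strip(']') for k in b]
--     b = [k.replace('[', '') for k in b]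
--     b = [k.replace(']', '') for k in b]
--     b = '*'.join(b)
--
--     return b
-- ===== SOURCE B (Python) =====
-- def small_glymotif_find(s):
--     """breaks down glycans into list of monomers, single character scan:
--     each paren becomes '*', brackets are dropped, everything else is kept."""
--     out = []
--     for c in s:
--         if c in '()':
--             out.append('*')
--         elif c in '[]':
--             pass
--         else:
--             out.append(c)
--     return ''.join(out)
-- ===== Notes on version B (the rewrite author's own statement) =====
-- stated objective: simpler
-- what changed: Replaced the seven-stage split/flatten/strip/replace/join chain by one character scan that emits an asterisk for each parenthesis, drops square brackets and keeps every other character.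
import Mathlib
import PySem

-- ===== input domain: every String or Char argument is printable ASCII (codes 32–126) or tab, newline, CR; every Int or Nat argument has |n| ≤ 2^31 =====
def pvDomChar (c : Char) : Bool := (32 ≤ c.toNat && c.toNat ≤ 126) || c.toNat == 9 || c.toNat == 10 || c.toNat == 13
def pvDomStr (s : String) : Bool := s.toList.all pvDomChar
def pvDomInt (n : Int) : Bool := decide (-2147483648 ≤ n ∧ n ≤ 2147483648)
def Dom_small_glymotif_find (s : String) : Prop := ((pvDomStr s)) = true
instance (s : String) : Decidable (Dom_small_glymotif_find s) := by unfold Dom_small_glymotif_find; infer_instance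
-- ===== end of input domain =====

-- B replaces A's seven-stage split/flatten/strip/replace/join chain by a single character scan
-- (each parenthesis becomes an asterisk, square brackets are dropped): simpler, one pass.

-- ===== PORT A =====
def small_glymotif_find (s : String) : String :=
  let b0 := (PySem.Str.split? s "(").getD []                       -- b = s.split('(')  (sep ≠ '', so never none)
  let b1 := b0.map (fun k => (PySem.Str.split? k ")").getD [])     -- b = [k.split(')') for k in b]
  let b2 := b1.flatten                                             -- b = [item for sublist in b for item in sublist]
  let b3 := b2.map (fun k => PySem.Str.stripChars k "[")           -- b = [k.strip('[') for k in b]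
  let b4 := b3.map (fun k => PySem.Str.stripChars k "]")           -- b = [k.strip(']') for k in b]
  let b5 := b4.map (fun k => PySem.Str.replace k "[" "")           -- b = [k.replace('[', '') for k in b]
  let b6 := b5.map (fun k => PySem.Str.replace k "]" "")           -- b = [k.replace(']', '') for k in b]
  PySem.Str.join "*" b6                                            -- b = '*'.join(b)

-- ===== PORT B =====
def small_glymotif_find_alt (s : String) : String :=
  String.ofList (s.toList.foldl (fun out c =>
    if c = '(' ∨ c = ')' then out ++ ['*']          -- if c in '()': out.append('*')
    else if c = '[' ∨ c = ']' then out              -- elif c in '[]': pass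
    else out ++ [c]) [])                            -- else: out.append(c)
                                                    -- return ''.join(out)  (single chars, exact)

-- ===== PRECONDITION & SPEC =====
def Spec_small_glymotif_find (s : String) (out : String) : Prop := out = small_glymotif_find_alt s
instance (s : String) (out : String) : Decidable (Spec_small_glymotif_find s out) := by unfold Spec_small_glymotif_find; infer_instance

-- ===== CLAIM (what is proved, stated in full; the proofs are below) =====
def Claim_equal_small_glymotif_find : Prop := ∀ (s : String), Dom_small_glymotif_find s → Spec_small_glymotif_find s (small_glymotif_find s)

-- ===== LEMMAS AND PROOFS =====

-- keep-predicate for brackets, the per-character emitters of B (and of the proof)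
def pvKeep (x : Char) : Bool := !(x == '[') && !(x == ']')
def pvDel (ks : List Char) : List Char := ks.filter pvKeep
def pvH (x : Char) : List Char := if x = ')' then ['*'] else if x = '[' ∨ x = ']' then [] else [x]
def pvF (x : Char) : List Char := if x = '(' ∨ x = ')' then ['*'] else if x = '[' ∨ x = ']' then [] else [x]

-- reference single-char splitter (accumulator form, mirrors splitOn.go)
def splitAux (c : Char) : List Char → List Char → List (List Char)
  | [], cur => [cur.reverse]
  | x :: xs, cur => if x = c then cur.reverse :: splitAux c xs [] else splitAux c xs (x :: cur)

theorem go_spec (c : Char) (fuel : Nat) : ∀ (l cur : List Char) (acc : List (List Char)), l.length ≤ fuel →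
    PySem.Chars.splitOn.go [c] fuel l cur acc = acc.reverse ++ splitAux c l cur := by
  induction fuel with
  | zero => intro l cur acc h; have hl : l = [] := by cases l <;> simp_all
            subst hl; rw [PySem.Chars.splitOn.go.eq_def]; simp [splitAux]
  | succ n ih =>
    intro l cur acc h
    cases l with
    | nil => rw [PySem.Chars.splitOn.go.eq_def]; simp [splitAux]
    | cons x xs =>
      rw [PySem.Chars.splitOn.go.eq_def]
      simp only [splitAux, List.isPrefixOf, List.length_cons, List.drop_succ_cons]
      by_cases hx : x = c
      · simp [hx, ih xs [] _ (by simpa using h)]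
      · simp [hx, Ne.symm hx, ih xs (x :: cur) acc (by simpa using h)]

theorem splitOn_single (c : Char) (l : List Char) :
    PySem.Chars.splitOn l [c] = splitAux c l [] := by
  simpa using go_spec c (l.length + 1) l [] [] (by omega)

theorem replace_go_spec (b : Char) (fuel : Nat) : ∀ (l acc : List Char), l.length ≤ fuel →
    PySem.Chars.replace.go [b] [] fuel l acc = acc.reverse ++ l.filter (fun x => !(x == b)) := by
  induction fuel with
  | zero => intro l acc h; have hl : l = [] := by cases l <;> simp_all
            subst hl; rw [PySem.Chars.replace.go.eq_def]; simp
  | succ n ih =>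
    intro l acc h
    cases l with
    | nil => rw [PySem.Chars.replace.go.eq_def]; simp
    | cons x xs =>
      rw [PySem.Chars.replace.go.eq_def]
      simp only [List.isPrefixOf, List.length_cons, List.drop_succ_cons]
      by_cases hx : x = b
      · simp [hx, ih xs _ (by simpa using h)]
      · simp [hx, Ne.symm hx, ih xs (x :: acc) (by simpa using h), List.filter_cons]

theorem replace_single (b : Char) (l : List Char) :
    PySem.Chars.replace l [b] [] = l.filter (fun x => !(x == b)) := by
  simpa [PySem.Chars.replace] using replace_go_spec b l.length l [] (by omega)

theorem filter_dropWhile {p q : Char → Bool} (h : ∀ x, q x = true → p x = false) (l : List Char) :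
    (l.dropWhile q).filter p = l.filter p := by
  induction l with
  | nil => rfl
  | cons x xs ih =>
    by_cases hx : q x = true
    · simp [List.dropWhile_cons, hx, ih, List.filter_cons, h x hx]
    · simp [List.dropWhile_cons, hx]


theorem filter_stripChars {p : Char → Bool} (chars : List Char)
    (h : ∀ x, x ∈ chars → p x = false) (l : List Char) :
    (PySem.Chars.stripChars l chars).filter p = l.filter p := by
  unfold PySem.Chars.stripChars
  rw [List.filter_reverse, filter_dropWhile (fun x hx => h x (by simpa using hx)),
      List.filter_reverse, filter_dropWhile (fun x hx => h x (by simpa using hx)),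
      List.reverse_reverse]

-- the per-piece strip/strip/replace/replace pipeline just deletes all brackets
theorem piece_eq (ks : List Char) :
    PySem.Chars.replace (PySem.Chars.replace
      (PySem.Chars.stripChars (PySem.Chars.stripChars ks ['[']) [']']) ['['] []) [']'] [] = pvDel ks := by
  rw [replace_single, replace_single, List.filter_filter]
  have hcg : ∀ l : List Char, l.filter (fun a => !(a == ']') && !(a == '[')) = l.filter pvKeep := by
    intro l; apply List.filter_congr; intro a _; simp [pvKeep, Bool.and_comm]
  rw [hcg, filter_stripChars [']'] (by intro x hx; simp at hx; simp [hx, pvKeep]),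
      filter_stripChars ['['] (by intro x hx; simp at hx; simp [hx, pvKeep])]
  rfl

theorem splitAux_ne_nil (c : Char) (l cur : List Char) : splitAux c l cur ≠ [] := by
  induction l generalizing cur with
  | nil => simp [splitAux]
  | cons x xs ih => by_cases hx : x = c <;> simp [splitAux, hx, ih]

theorem join_append (sep : List Char) (A B : List (List Char)) (hA : A ≠ []) (hB : B ≠ []) :
    PySem.Chars.join sep (A ++ B) = PySem.Chars.join sep A ++ sep ++ PySem.Chars.join sep B := by
  induction A with
  | nil => simp at hA
  | cons a as ih =>
    cases as with
    | nil =>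
      obtain ⟨b, bs, rfl⟩ := List.exists_cons_of_ne_nil hB
      simp [PySem.Chars.join_cons_cons, PySem.Chars.join_singleton]
    | cons a' as' =>
      rw [List.cons_append, List.cons_append, PySem.Chars.join_cons_cons,
          PySem.Chars.join_cons_cons, ← List.cons_append, ih (by simp)]
      simp

theorem pvDel_single (x : Char) (hx : x ≠ ')') : List.filter pvKeep [x] = pvH x := by
  by_cases h1 : x = '[' <;> by_cases h2 : x = ']' <;> simp [pvKeep, pvH, hx, h1, h2]

-- joining the ')'-split of ks (bracket-deleted pieces) with '*' = per-character emission pvH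
theorem j2 (ks : List Char) : ∀ cur : List Char,
    PySem.Chars.join ['*'] ((splitAux ')' ks cur).map pvDel) = pvDel cur.reverse ++ ks.flatMap pvH := by
  induction ks with
  | nil => intro cur; simp [splitAux, PySem.Chars.join_singleton]
  | cons x xs ih =>
    intro cur
    by_cases hx : x = ')'
    · subst hx
      obtain ⟨y, ys, hy⟩ := List.exists_cons_of_ne_nil (splitAux_ne_nil ')' xs [])
      have h0 := ih []
      rw [show splitAux ')' (')' :: xs) cur = cur.reverse :: splitAux ')' xs [] by simp [splitAux],
          hy, List.map_cons, List.map_cons, PySem.Chars.join_cons_cons, ← List.map_cons, ← hy, h0]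
      simp [pvDel, pvH]
    · rw [show splitAux ')' (x :: xs) cur = splitAux ')' xs (x :: cur) by simp [splitAux, hx], ih]
      simp only [List.reverse_cons, pvDel, List.filter_append, List.flatMap_cons, List.append_assoc]
      rw [pvDel_single x hx]

theorem flatMap_split_ne_nil (c : Char) (ps : List (List Char)) (hp : ps ≠ []) :
    ps.flatMap (fun k => splitAux c k []) ≠ [] := by
  obtain ⟨p, ps2, rfl⟩ := List.exists_cons_of_ne_nil hp
  obtain ⟨y, ys, hy⟩ := List.exists_cons_of_ne_nil (splitAux_ne_nil c p [])
  simp [List.flatMap_cons, hy]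

-- master lemma: A's whole chars-level pipeline = per-character emission pvF
theorem master (cs : List Char) : ∀ cur : List Char,
    PySem.Chars.join ['*'] (((splitAux '(' cs cur).flatMap (fun k => splitAux ')' k [])).map pvDel)
      = cur.reverse.flatMap pvH ++ cs.flatMap pvF := by
  induction cs with
  | nil =>
    intro cur
    simp only [splitAux, List.flatMap_cons, List.flatMap_nil, List.append_nil]
    simpa [pvDel] using j2 cur.reverse []
  | cons x xs ih =>
    intro cur
    by_cases hx : x = '('
    · subst hx
      rw [show splitAux '(' ('(' :: xs) cur = cur.reverse :: splitAux '(' xs [] by simp [splitAux],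
          List.flatMap_cons, List.map_append,
          join_append _ _ _
            (by obtain ⟨y, ys, hy⟩ := List.exists_cons_of_ne_nil (splitAux_ne_nil ')' cur.reverse []); simp [hy])
            (by have h2 := flatMap_split_ne_nil ')' (splitAux '(' xs []) (splitAux_ne_nil '(' xs [])
                simpa using h2)]
      have h1 := j2 cur.reverse ([] : List Char)
      simp only [List.reverse_nil, pvDel, List.filter_nil, List.nil_append] at h1
      rw [h1, ih []]
      simp [pvF]
    · rw [show splitAux '(' (x :: xs) cur = splitAux '(' xs (x :: cur) by simp [splitAux, hx], ih]
      have hxF : pvH x = pvF x := by simp [pvH, pvF, hx]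
      simp [List.flatMap_append, hxF]

-- Str-level: splitting on a one-character separator, pieces as lists of chars
theorem split_paren_toList (s sep : String) (c : Char) (hc : sep.toList = [c]) :
    ((PySem.Str.split? s sep).getD []).map String.toList = splitAux c s.toList [] := by
  have h := PySem.Str.split?_map s sep
  rw [hc] at h
  simp only [PySem.Chars.split?, List.isEmpty_cons] at h
  cases hs : PySem.Str.split? s sep with
  | none => rw [hs] at h; simp at h
  | some l =>
    rw [hs] at h
    simp only [Option.map_some, if_false, Bool.false_eq_true, reduceIte, Option.some.injEq] at h
    simpa [splitOn_single] using h

-- B's fold step, extensionally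
theorem step_eq : (fun (out : List Char) (c : Char) =>
    if c = '(' ∨ c = ')' then out ++ ['*']
    else if c = '[' ∨ c = ']' then out
    else out ++ [c]) = fun out c => out ++ pvF c := by
  funext out c
  by_cases h1 : c = '(' ∨ c = ')' <;> by_cases h2 : c = '[' ∨ c = ']' <;> simp [pvF, h1, h2]

theorem alt_toList (s : String) : (small_glymotif_find_alt s).toList = s.toList.flatMap pvF := by
  unfold small_glymotif_find_alt
  rw [step_eq, PySem.List.foldl_append_eq_flatMap]
  simp

theorem piece_str (k : String) :
    (PySem.Str.replace (PySem.Str.replace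
      (PySem.Str.stripChars (PySem.Str.stripChars k "[") "]") "[" "") "]" "").toList = pvDel k.toList := by
  simp only [PySem.Str.toList_replace, PySem.Str.toList_stripChars]
  rw [show ("[" : String).toList = ['['] from by decide,
      show ("]" : String).toList = [']'] from by decide,
      show ("" : String).toList = ([] : List Char) from by decide]
  exact piece_eq k.toList

theorem flatten_map_eq (g : List Char → List Char) (F : List Char → List (List Char))
    (l : List (List Char)) :
    (l.map (fun pl => (F pl).map g)).flatten = (l.flatMap F).map g := by
  induction l <;> simp_all

theorem map_piece (l : List String) :
    l.map (fun k => (PySem.Str.replace (PySem.Str.replace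
      (PySem.Str.stripChars (PySem.Str.stripChars k "[") "]") "[" "") "]" "").toList)
      = l.map (fun k => pvDel k.toList) :=
  List.map_congr_left (fun k _ => piece_str k)

theorem hin (p : String) :
    ((PySem.Str.split? p ")").getD []).map (fun k => pvDel k.toList)
      = (splitAux ')' p.toList []).map pvDel := by
  rw [show (fun k : String => pvDel k.toList) = pvDel ∘ String.toList from rfl,
      ← List.map_map, split_paren_toList p ")" ')' (by decide)]

theorem map_hin (l : List String) :
    l.map (fun p => ((PySem.Str.split? p ")").getD []).map (fun k => pvDel k.toList))
      = l.map (fun p => (splitAux ')' p.toList []).map pvDel) :=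
  List.map_congr_left (fun p _ => hin p)

-- ===== VERDICT (by name: the statement is the Claim_ definition above) =====
theorem small_glymotif_find_spec : Claim_equal_small_glymotif_find := by
  intro s _
  unfold Spec_small_glymotif_find
  apply String.ext
  rw [alt_toList]
  unfold small_glymotif_find
  simp only [PySem.Str.toList_join, List.map_map, Function.comp_def]
  rw [map_piece, List.map_flatten, List.map_map]
  simp only [Function.comp_def]
  rw [map_hin]
  rw [show (fun p : String => (splitAux ')' p.toList []).map pvDel)
        = (fun pl => (splitAux ')' pl []).map pvDel) ∘ String.toList from rfl,
      ← List.map_map, split_paren_toList s "(" '(' (by decide)]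
  rw [flatten_map_eq pvDel (fun pl => splitAux ')' pl []) (splitAux '(' s.toList [])]
  rw [show ("*" : String).toList = ['*'] from by decide]
  simpa using master s.toList []
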